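-- pv_equiv track=rewrite | github.com/YacineCC/UNI | L2/I43/V/TP2/ex1.py | enumere_keys
-- ===== SOURCE A (Python) =====
-- def egcd(a,n):
--
--
--
--     u,v1 = 1,1
--     u1,v = 0,0
--
--     while(n>0):
--         q = a//n
--
--         u,v,u1,v1 = u1,v1,u-(q*u1),v-(q*v1)
--
--         a,n = n, a%n
--
--     return [a,u,v]
--
-- def enumere_keys(n):
--     res = []
--     i = 2
--     while(i < n):
--
--         test = egcd(i,n)
--         # On regarde si i et n sont premiers entre eux pour tous les i
--         if(test[0] == 1):
--             #creation de toutes les clefs possibles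
--             for j in range(n):
--                 res += [[i,j,n]]
--
--         i += 1
--     return res
-- ===== SOURCE B (Python) =====
-- def enumere_keys(n):
--     # factor n into its distinct primes by trial division
--     primes = []
--     m = n
--     d = 2
--     while d * d <= m:
--         if m % d == 0:
--             primes.append(d)
--             while m % d == 0:
--                 m //= d
--         d += 1
--     if m > 1:
--         primes.append(m)
--     # sieve: mark every index in [0, n) sharing a prime factor with n
--     marked = set()
--     for p in primes:
--         marked.update(range(0, n, p))
--     res = []
--     for i in range(2, n):
--         if i not in marked:
--             for j in range(n):
--                 res.append([i, j, n])
--     return res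
-- ===== Notes on version B (the rewrite author's own statement) =====
-- stated objective: alternative
-- what changed: Replaces the per-i extended-Euclid gcd test with a factor-then-sieve pass: n is trial-divided once into its distinct prime factors, all their multiples in [0, n) are marked in a set, and rows are emitted for the unmarked i.
import Mathlib
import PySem

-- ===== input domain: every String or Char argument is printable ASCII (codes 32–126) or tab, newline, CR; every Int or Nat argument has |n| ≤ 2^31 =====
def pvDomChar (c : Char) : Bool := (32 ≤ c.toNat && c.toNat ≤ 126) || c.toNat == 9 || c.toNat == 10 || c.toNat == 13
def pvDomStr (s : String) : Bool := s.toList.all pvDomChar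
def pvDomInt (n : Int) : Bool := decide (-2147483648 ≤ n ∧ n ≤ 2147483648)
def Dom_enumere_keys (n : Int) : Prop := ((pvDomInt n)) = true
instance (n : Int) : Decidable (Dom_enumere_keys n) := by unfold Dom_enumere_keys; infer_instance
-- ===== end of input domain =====

-- B replaces per-i extended Euclid by a factor-then-sieve pass (trial-divide n once into its distinct
-- prime factors, mark their multiples in [0, n) in a set, then emit rows for the unmarked i);
-- objective: alternative. Same rows, same order. Loops carry a Nat fuel that only makes the
-- recursion total; each entry point supplies fuel sufficient for the Python loop's iterations.

-- ===== PORT A =====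
-- the 'while n > 0' loop of egcd; state (a, n, u, v, u1, v1); fuel n.toNat suffices (n = a % n shrinks)
def egcdLoop : Nat → Int → Int → Int → Int → Int → Int → List Int
  | 0, a, _, u, v, _, _ => [a, u, v]
  | fuel + 1, a, n, u, v, u1, v1 =>
    if 0 < n then
      egcdLoop fuel n (PySem.Int.mod a n) u1 v1
        (u - PySem.Int.floordiv a n * u1) (v - PySem.Int.floordiv a n * v1)
    else [a, u, v]

def pyEgcd (a n : Int) : List Int := egcdLoop n.toNat a n 1 0 0 1

-- the 'while i < n' loop of enumere_keys; fuel (n - i).toNat suffices (i counts up to n)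
def keysLoop : Nat → Int → Int → List (List Int) → List (List Int)
  | 0, _, _, res => res
  | fuel + 1, n, i, res =>
    if i < n then
      keysLoop fuel n (i + 1)
        (if PySem.List.pyGet? (pyEgcd i n) 0 = some 1 then
          (PySem.List.pyRange 0 n 1).foldl (fun r j => r ++ [[i, j, n]]) res
        else res)
    else res

def enumere_keys (n : Int) : List (List Int) := keysLoop (n - 2).toNat n 2 []

-- ===== PORT B =====
-- inner 'while m % d == 0: m //= d'; fuel m.toNat suffices (m shrinks by a factor d ≥ 2);
-- the 0 < m and 2 ≤ d tests only keep the fuel bound honest (the loop always runs with such m, d)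
def divOut : Nat → Int → Int → Int
  | 0, m, _ => m
  | fuel + 1, m, d =>
    if 0 < m ∧ 2 ≤ d ∧ PySem.Int.mod m d = 0 then divOut fuel (PySem.Int.floordiv m d) d
    else m

-- the 'while d * d <= m' trial-division loop; fuel (m - d).toNat suffices (d counts up, m never grows)
def facLoop : Nat → Int → Int → List Int → Int × List Int
  | 0, m, _, ps => (m, ps)
  | fuel + 1, m, d, ps =>
    if 2 ≤ d ∧ d * d ≤ m then
      if PySem.Int.mod m d = 0 then facLoop fuel (divOut m.toNat m d) (d + 1) (ps ++ [d])
      else facLoop fuel m (d + 1) ps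
    else (m, ps)

-- distinct prime factors of n, ascending
def primesOf (n : Int) : List Int :=
  let r := facLoop (n - 2).toNat n 2 []
  if 1 < r.1 then r.2 ++ [r.1] else r.2

-- the sieve: every index in [0, n) that shares a prime factor with n
def markedOf (n : Int) : PySem.Set Int :=
  (primesOf n).foldl (fun s p => PySem.Set.update s (PySem.List.pyRange 0 n p)) PySem.Set.empty

def enumere_keys_alt (n : Int) : List (List Int) :=
  (PySem.List.pyRange 2 n 1).foldl
    (fun res i =>
      if PySem.Set.contains (markedOf n) i then res
      else (PySem.List.pyRange 0 n 1).foldl (fun r j => r ++ [[i, j, n]]) res)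
    []

-- ===== PRECONDITION & SPEC =====
def Spec_enumere_keys (n : Int) (out : List (List Int)) : Prop := out = enumere_keys_alt n
instance (n : Int) (out : List (List Int)) : Decidable (Spec_enumere_keys n out) := by unfold Spec_enumere_keys; infer_instance

-- ===== CLAIM (what is proved, stated in full; the proofs are below) =====
def Claim_equal_enumere_keys : Prop := ∀ (n : Int), Dom_enumere_keys n → Spec_enumere_keys n (enumere_keys n)

-- ===== LEMMAS AND PROOFS =====

theorem egcdLoop_gcd : ∀ (fuel : Nat) (a n u v u1 v1 : Int), 0 ≤ a → 0 ≤ n → n.toNat ≤ fuel →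
    ∃ x y, egcdLoop fuel a n u v u1 v1 = [(Int.gcd a n : Int), x, y] := by
  intro fuel
  induction fuel with
  | zero =>
    intro a n u v u1 v1 ha hn hf
    have hn0 : n = 0 := by omega
    subst hn0
    refine ⟨u, v, ?_⟩
    rw [egcdLoop, show ((Int.gcd a 0 : ℕ) : ℤ) = a by rw [Int.gcd_zero_right, Int.natAbs_of_nonneg ha]]
  | succ fuel IH =>
    intro a n u v u1 v1 ha hn hf
    rw [egcdLoop]
    by_cases h : 0 < n
    · rw [if_pos h]
      have hlt : (PySem.Int.mod a n).toNat < n.toNat := by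
        have h1 := PySem.Int.mod_nonneg a h
        have h2 := PySem.Int.mod_lt a h
        omega
      obtain ⟨x, y, hxy⟩ := IH n (PySem.Int.mod a n) u1 v1
        (u - PySem.Int.floordiv a n * u1) (v - PySem.Int.floordiv a n * v1)
        (by omega) (PySem.Int.mod_nonneg a h) (by omega)
      refine ⟨x, y, ?_⟩
      rw [hxy, PySem.Int.mod_eq_emod_of_pos h]
      have key : Int.gcd n (a % n) = Int.gcd a n := by
        obtain ⟨A, rfl⟩ := Int.eq_ofNat_of_zero_le ha
        obtain ⟨N, rfl⟩ := Int.eq_ofNat_of_zero_le h.le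
        have hcast : ((A : ℤ) % (N : ℤ)) = ((A % N : ℕ) : ℤ) := by push_cast; rfl
        rw [hcast, Int.gcd_natCast_natCast, Int.gcd_natCast_natCast,
          Nat.gcd_comm N (A % N), ← Nat.gcd_rec, Nat.gcd_comm]
      rw [key]
    · rw [if_neg h]
      have hn0 : n = 0 := by omega
      subst hn0
      refine ⟨u, v, ?_⟩
      rw [show ((Int.gcd a 0 : ℕ) : ℤ) = a by rw [Int.gcd_zero_right, Int.natAbs_of_nonneg ha]]

theorem pyGet_egcd (i n : Int) (hi : 0 ≤ i) (hn : 0 ≤ n) :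
    PySem.List.pyGet? (pyEgcd i n) 0 = some (Int.gcd i n : Int) := by
  obtain ⟨x, y, h⟩ := egcdLoop_gcd n.toNat i n 1 0 0 1 hi hn le_rfl
  unfold pyEgcd
  rw [h]
  simp [PySem.List.pyGet?, PySem.List.pyIdx?]

theorem divOut_le : ∀ (fuel : Nat) (m d : Int), divOut fuel m d ≤ m := by
  intro fuel
  induction fuel with
  | zero => intro m d; rw [divOut]
  | succ fuel IH =>
    intro m d
    rw [divOut]
    by_cases h : 0 < m ∧ 2 ≤ d ∧ PySem.Int.mod m d = 0
    · rw [if_pos h]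
      obtain ⟨hm, hd, hmod⟩ := h
      refine (IH _ _).trans ?_
      rw [PySem.Int.floordiv_eq_ediv_of_pos (by omega : (0:ℤ) < d)]
      exact Int.ediv_le_self d (by omega)
    · rw [if_neg h]

theorem divOut_spec : ∀ (fuel : Nat) (m d : Int), 0 < m → 2 ≤ d → m.toNat ≤ fuel →
    ∃ k : ℕ, m = d ^ k * divOut fuel m d ∧ 0 < divOut fuel m d ∧ ¬ d ∣ divOut fuel m d := by
  intro fuel
  induction fuel with
  | zero => intro m d hm hd hf; omega
  | succ fuel IH =>
    intro m d hm hd2 hf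
    rw [divOut]
    by_cases h : 0 < m ∧ 2 ≤ d ∧ PySem.Int.mod m d = 0
    · rw [if_pos h]
      obtain ⟨h1, h2, hmod⟩ := h
      have hdvd : d ∣ m := (PySem.Int.mod_eq_zero_iff_dvd m d).1 hmod
      have hfd : PySem.Int.floordiv m d = m / d := PySem.Int.floordiv_eq_ediv_of_pos (by omega)
      have hmul : m / d * d = m := Int.ediv_mul_cancel hdvd
      have hpos : 0 < m / d := by nlinarith
      have hlt : m / d < m := by nlinarith
      obtain ⟨k, hk1, hk2, hk3⟩ := IH (PySem.Int.floordiv m d) d (by rw [hfd]; exact hpos) hd2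
        (by rw [hfd]; omega)
      refine ⟨k + 1, ?_, hk2, hk3⟩
      generalize hX : divOut fuel (PySem.Int.floordiv m d) d = X at hk1 ⊢
      rw [hfd] at hk1
      rw [pow_succ]
      rw [hk1] at hmul
      linear_combination -hmul
    · rw [if_neg h]
      have hmod : ¬ PySem.Int.mod m d = 0 := fun hx => h ⟨hm, hd2, hx⟩
      exact ⟨0, by ring, hm, fun hdvd => hmod ((PySem.Int.mod_eq_zero_iff_dvd m d).2 hdvd)⟩

-- the terminal state of the trial-division loop: m < d * d, so m is 1 or a prime
theorem facBase (n m d : Int) (ps : List Int)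
    (hm : 0 < m) (hd2 : 2 ≤ d) (hmn : m ∣ n)
    (hfac : ∀ p : Int, 0 < p → Prime p → p ∣ m → d ≤ p)
    (hiff : ∀ p : Int, 0 < p → Prime p → d ≤ p → (p ∣ m ↔ p ∣ n))
    (hps : ∀ p : Int, p ∈ ps ↔ 0 < p ∧ Prime p ∧ p ∣ n ∧ p < d)
    (hmd : m < d * d) :
    ∀ p : Int, (p ∈ ps ∨ (1 < m ∧ p = m)) ↔ (0 < p ∧ Prime p ∧ p ∣ n) := by
  have hmprime : 1 < m → Prime m := by
    intro h1m
    by_contra hnp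
    have hnp' : ¬ Nat.Prime m.natAbs := fun hx => hnp (Int.prime_iff_natAbs_prime.2 hx)
    have hqp := Nat.minFac_prime (show m.natAbs ≠ 1 by omega)
    have hqm : ((m.natAbs.minFac : ℕ) : ℤ) ∣ m := by
      have h1 : ((m.natAbs.minFac : ℕ) : ℤ) ∣ ((m.natAbs : ℕ) : ℤ) :=
        Int.natCast_dvd_natCast.2 (Nat.minFac_dvd _)
      rwa [Int.natAbs_of_nonneg (by omega : (0:ℤ) ≤ m)] at h1
    have hge : d ≤ ((m.natAbs.minFac : ℕ) : ℤ) := by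
      apply hfac _ (by exact_mod_cast hqp.pos) _ hqm
      rw [Int.prime_iff_natAbs_prime, Int.natAbs_natCast]
      exact hqp
    have hsq := Nat.minFac_sq_le_self (show 0 < m.natAbs by omega) hnp'
    have hsq' : ((m.natAbs.minFac : ℕ) : ℤ) * ((m.natAbs.minFac : ℕ) : ℤ) ≤ m := by
      have h2 : ((m.natAbs.minFac ^ 2 : ℕ) : ℤ) ≤ ((m.natAbs : ℕ) : ℤ) := by exact_mod_cast hsq
      rw [Int.natAbs_of_nonneg (by omega : (0:ℤ) ≤ m)] at h2
      push_cast at h2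
      nlinarith
    nlinarith
  intro p
  constructor
  · rintro (hp | ⟨h1m, rfl⟩)
    · obtain ⟨a, b, c, _⟩ := (hps p).1 hp
      exact ⟨a, b, c⟩
    · exact ⟨by omega, hmprime h1m, hmn⟩
  · rintro ⟨hp0, hpp, hpn⟩
    by_cases hpd : p < d
    · exact Or.inl ((hps p).2 ⟨hp0, hpp, hpn, hpd⟩)
    · have hpm : p ∣ m := (hiff p hp0 hpp (by omega)).2 hpn
      have hple : p ≤ m := Int.le_of_dvd hm hpm
      have h2p : 2 ≤ p := by
        have := (Int.prime_iff_natAbs_prime.1 hpp).two_le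
        omega
      have h1m : 1 < m := by omega
      right
      refine ⟨h1m, ?_⟩
      have hq1 : Nat.Prime p.natAbs := Int.prime_iff_natAbs_prime.1 hpp
      have hq2 : Nat.Prime m.natAbs := Int.prime_iff_natAbs_prime.1 (hmprime h1m)
      have hdd : p.natAbs ∣ m.natAbs := Int.natAbs_dvd_natAbs.2 hpm
      have := (Nat.prime_dvd_prime_iff_eq hq1 hq2).1 hdd
      omega

theorem facLoop_char (n : Int) : ∀ (fuel : Nat) (m d : Int) (ps : List Int),
    0 < m → 2 ≤ d → m ∣ n →
    (∀ p : Int, 0 < p → Prime p → p ∣ m → d ≤ p) →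
    (∀ p : Int, 0 < p → Prime p → d ≤ p → (p ∣ m ↔ p ∣ n)) →
    (∀ p : Int, p ∈ ps ↔ 0 < p ∧ Prime p ∧ p ∣ n ∧ p < d) →
    (m - d).toNat ≤ fuel →
    ∀ p : Int, (p ∈ (facLoop fuel m d ps).2 ∨
        (1 < (facLoop fuel m d ps).1 ∧ p = (facLoop fuel m d ps).1))
      ↔ (0 < p ∧ Prime p ∧ p ∣ n) := by
  intro fuel
  induction fuel with
  | zero =>
    intro m d ps hm hd2 hmn hfac hiff hps hf
    rw [facLoop]
    have hmd : m ≤ d := by omega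
    exact facBase n m d ps hm hd2 hmn hfac hiff hps (by nlinarith)
  | succ fuel IH =>
    intro m d ps hm hd2 hmn hfac hiff hps hf
    rw [facLoop]
    by_cases h : 2 ≤ d ∧ d * d ≤ m
    · rw [if_pos h]
      have hdlt : d < m := by nlinarith
      by_cases hd : PySem.Int.mod m d = 0
      · rw [if_pos hd]
        have hddvd : d ∣ m := (PySem.Int.mod_eq_zero_iff_dvd m d).1 hd
        obtain ⟨k, hmk, hm', hnd⟩ := divOut_spec m.toNat m d hm hd2 le_rfl
        have hdd' : m = divOut m.toNat m d * d ^ k := by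
          conv_lhs => rw [hmk]
          ring
        have hdivdvd : divOut m.toNat m d ∣ m := ⟨d ^ k, hdd'⟩
        have hdle := divOut_le m.toNat m d
        have hdp : Prime d := by
          have hne1 : d.natAbs ≠ 1 := by omega
          have hqp := Nat.minFac_prime hne1
          have hqd : ((d.natAbs.minFac : ℕ) : ℤ) ∣ d := by
            have h1 : ((d.natAbs.minFac : ℕ) : ℤ) ∣ ((d.natAbs : ℕ) : ℤ) :=
              Int.natCast_dvd_natCast.2 (Nat.minFac_dvd _)
            rwa [Int.natAbs_of_nonneg (by omega : (0:ℤ) ≤ d)] at h1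
          have hqm : ((d.natAbs.minFac : ℕ) : ℤ) ∣ m := hqd.trans hddvd
          have hge : d ≤ ((d.natAbs.minFac : ℕ) : ℤ) := by
            apply hfac _ (by exact_mod_cast hqp.pos) _ hqm
            rw [Int.prime_iff_natAbs_prime, Int.natAbs_natCast]
            exact hqp
          have hle := Nat.minFac_le (show 0 < d.natAbs by omega)
          rw [Int.prime_iff_natAbs_prime, show d.natAbs = d.natAbs.minFac by omega]
          exact hqp
        apply IH _ _ _ hm' (by omega) (hdivdvd.trans hmn)
        · intro p hp0 hpp hpdvd
          have hge := hfac p hp0 hpp (hpdvd.trans hdivdvd)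
          have hpne : p ≠ d := by rintro rfl; exact hnd hpdvd
          omega
        · intro p hp0 hpp hple
          constructor
          · intro h'
            exact (hiff p hp0 hpp (by omega)).1 (h'.trans hdivdvd)
          · intro hpn
            have hpm : p ∣ m := (hiff p hp0 hpp (by omega)).2 hpn
            rw [hmk] at hpm
            rcases hpp.dvd_mul.1 hpm with h' | h'
            · have hpd : p ∣ d := hpp.dvd_of_dvd_pow h'
              have := Int.le_of_dvd (by omega) hpd
              omega
            · exact h'
        · intro p
          rw [List.mem_append, List.mem_singleton]
          constructor
          · rintro (hp | rfl)
            · obtain ⟨a, b, c, l⟩ := (hps p).1 hp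
              exact ⟨a, b, c, by omega⟩
            · exact ⟨by omega, hdp, hddvd.trans hmn, by omega⟩
          · rintro ⟨hp0, hpp, hpn, hlt⟩
            by_cases hpd : p < d
            · exact Or.inl ((hps p).2 ⟨hp0, hpp, hpn, hpd⟩)
            · right; omega
        · omega
      · rw [if_neg hd]
        have hnd : ¬ d ∣ m := fun hdvd => hd ((PySem.Int.mod_eq_zero_iff_dvd m d).2 hdvd)
        apply IH _ _ _ hm (by omega) hmn
        · intro p hp0 hpp hpm
          have hge := hfac p hp0 hpp hpm
          have hne : p ≠ d := by rintro rfl; exact hnd hpm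
          omega
        · intro p hp0 hpp hple
          exact hiff p hp0 hpp (by omega)
        · intro p
          rw [hps p]
          constructor
          · rintro ⟨a, b, c, l⟩; exact ⟨a, b, c, by omega⟩
          · rintro ⟨hp0, hpp, hpn, hlt⟩
            refine ⟨hp0, hpp, hpn, ?_⟩
            by_cases hpd : p = d
            · subst hpd
              exact absurd ((hiff p hp0 hpp le_rfl).2 hpn) hnd
            · omega
        · omega
    · rw [if_neg h]
      have hmd : m < d * d := by
        by_contra hx
        exact h ⟨hd2, by omega⟩
      exact facBase n m d ps hm hd2 hmn hfac hiff hps hmd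

theorem primes_char (n : Int) (hn : 0 < n) :
    ∀ p : Int, p ∈ primesOf n ↔ 0 < p ∧ Prime p ∧ p ∣ n := by
  intro p
  have h := facLoop_char n (n - 2).toNat n 2 [] hn le_rfl dvd_rfl
    (fun p hp0 hpp _ => by
      have := (Int.prime_iff_natAbs_prime.1 hpp).two_le
      omega)
    (fun _ _ _ _ => Iff.rfl)
    (fun p => Iff.intro (fun hx => absurd hx (List.not_mem_nil))
      (fun hx => ((by
        have := (Int.prime_iff_natAbs_prime.1 hx.2.1).two_le
        have := hx.1
        have := hx.2.2.2
        omega : False)).elim))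
    le_rfl
    p
  rw [← h]
  unfold primesOf
  by_cases h1 : 1 < (facLoop (n - 2).toNat n 2 []).1
  · simp [h1]
  · simp [h1]

theorem mem_foldl_update (f : Int → List Int) : ∀ (l : List Int) (s : PySem.Set Int) (y : Int),
    (y ∈ l.foldl (fun s p => PySem.Set.update s (f p)) s) ↔ y ∈ s ∨ ∃ p ∈ l, y ∈ f p := by
  intro l
  induction l with
  | nil => simp
  | cons a t IH =>
    intro s y
    simp only [List.foldl_cons, IH, PySem.Set.mem_update, List.mem_cons]
    constructor
    · rintro ((h | h) | ⟨p, hp, hy⟩)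
      · exact Or.inl h
      · exact Or.inr ⟨a, Or.inl rfl, h⟩
      · exact Or.inr ⟨p, Or.inr hp, hy⟩
    · rintro (h | ⟨p, (rfl | hp), hy⟩)
      · exact Or.inl (Or.inl h)
      · exact Or.inl (Or.inr hy)
      · exact Or.inr ⟨p, hp, hy⟩

theorem cond_iff (n i : Int) (h2 : 2 ≤ i) (hin : i < n) :
    Int.gcd i n = 1 ↔ ¬ i ∈ markedOf n := by
  have hn : 0 < n := by omega
  have hmem : i ∈ markedOf n ↔ ∃ p, (0 < p ∧ Prime p ∧ p ∣ n) ∧ p ∣ i := by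
    unfold markedOf
    rw [mem_foldl_update]
    constructor
    · rintro (h | ⟨p, hp, hip⟩)
      · exact absurd h (List.not_mem_nil)
      · have hpc := (primes_char n hn p).1 hp
        rw [PySem.List.mem_pyRange_iff_of_pos hpc.1] at hip
        exact ⟨p, hpc, by simpa using hip.2.2⟩
    · rintro ⟨p, hpc, hpi⟩
      exact Or.inr ⟨p, (primes_char n hn p).2 hpc,
        (PySem.List.mem_pyRange_iff_of_pos hpc.1 i).2 ⟨by omega, hin, by simpa using hpi⟩⟩
  rw [hmem]
  constructor
  · rintro hg ⟨p, ⟨hp0, hpp, hpn⟩, hpi⟩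
    have hq : Nat.Prime p.natAbs := Int.prime_iff_natAbs_prime.1 hpp
    have hd1 : p.natAbs ∣ i.natAbs := Int.natAbs_dvd_natAbs.2 hpi
    have hd2 : p.natAbs ∣ n.natAbs := Int.natAbs_dvd_natAbs.2 hpn
    have hdg : p.natAbs ∣ Int.gcd i n := Nat.dvd_gcd hd1 hd2
    rw [hg] at hdg
    exact absurd (Nat.dvd_one.1 hdg) (by have := hq.two_le; omega)
  · intro hne
    by_contra hg
    obtain ⟨q, hqp, hqi, hqn⟩ := Nat.Prime.not_coprime_iff_dvd.1 hg
    apply hne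
    refine ⟨(q : ℤ), ⟨by exact_mod_cast hqp.pos, ?_, ?_⟩, ?_⟩
    · rw [Int.prime_iff_natAbs_prime, Int.natAbs_natCast]; exact hqp
    · exact Int.natAbs_dvd_natAbs.1 (by rwa [Int.natAbs_natCast])
    · exact Int.natAbs_dvd_natAbs.1 (by rwa [Int.natAbs_natCast])

theorem keysLoop_eq (n : Int) : ∀ (fuel : Nat) (i : Int) (res : List (List Int)),
    (n - i).toNat ≤ fuel →
    keysLoop fuel n i res = (PySem.List.pyRange i n 1).foldl
      (fun res i =>
        if PySem.List.pyGet? (pyEgcd i n) 0 = some 1 then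
          (PySem.List.pyRange 0 n 1).foldl (fun r j => r ++ [[i, j, n]]) res
        else res) res := by
  intro fuel
  induction fuel with
  | zero =>
    intro i res hf
    rw [keysLoop, PySem.List.pyRange_one_eq_nil (show n ≤ i by omega), List.foldl_nil]
  | succ fuel IH =>
    intro i res hf
    rw [keysLoop]
    by_cases h : i < n
    · rw [if_pos h, PySem.List.pyRange_one_cons h, List.foldl_cons]
      exact IH (i + 1) _ (by omega)
    · rw [if_neg h, PySem.List.pyRange_one_eq_nil (show n ≤ i by omega), List.foldl_nil]

-- ===== VERDICT (by name: the statement is the Claim_ definition above) =====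
theorem enumere_keys_spec : Claim_equal_enumere_keys := by
  intro n _
  unfold Spec_enumere_keys enumere_keys enumere_keys_alt
  rw [keysLoop_eq n (n - 2).toNat 2 [] le_rfl]
  apply PySem.List.foldl_congr_mem
  intro acc i hi
  rw [PySem.List.mem_pyRange_one] at hi
  have hg := pyGet_egcd i n (by omega) (by omega)
  have hiff := cond_iff n i (by omega) (by omega)
  by_cases hc : i ∈ markedOf n
  · have hc' : PySem.Set.contains (markedOf n) i = true := (PySem.Set.contains_iff _ _).2 hc
    have hne : Int.gcd i n ≠ 1 := fun hx => (hiff.1 hx) hc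
    have h1 : ¬ (some ((Int.gcd i n : ℕ) : ℤ) = some 1) := by
      intro hx
      exact hne (by exact_mod_cast Option.some.inj hx)
    rw [hg, hc', if_neg h1, if_pos rfl]
  · have hc' : PySem.Set.contains (markedOf n) i = false := by
      rw [← Bool.not_eq_true, PySem.Set.contains_iff]; exact hc
    have hone : Int.gcd i n = 1 := hiff.2 hc
    have h1 : (some ((Int.gcd i n : ℕ) : ℤ)) = some 1 := by rw [hone]; norm_num
    rw [hg, hc', if_pos h1, if_neg (by decide)]
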